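-- pv_equiv track=rewrite | github.com/aw0605/CodingTest | 프로그래머스/2/49993. 스킬트리/스킬트리.py | solution
-- ===== SOURCE A (Python) =====
-- def solution(skill, skill_trees):
--     answer = 0
--
--     for v in skill_trees:
--         order = ""
--         for s in v:
--             if s in skill: order += s
--
--         if skill[:len(order)] == order: answer += 1
--
--     return answer
-- ===== SOURCE B (Python) =====
-- def solution(skill, skill_trees):
--     count = 0
--     for tree in skill_trees:
--         pos = 0
--         ok = True
--         for c in tree:
--             if c in skill:
--                 if pos >= len(skill) or c != skill[pos]:
--                     ok = False
--                     break
--                 pos += 1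
--         if ok:
--             count += 1
--     return count
-- ===== Notes on version B (the rewrite author's own statement) =====
-- stated objective: idiomatic
-- what changed: B validates each tree in a single scan with an index into skill and early exit, instead of building the filtered string and comparing it to a prefix slice of skill.
import Mathlib
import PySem

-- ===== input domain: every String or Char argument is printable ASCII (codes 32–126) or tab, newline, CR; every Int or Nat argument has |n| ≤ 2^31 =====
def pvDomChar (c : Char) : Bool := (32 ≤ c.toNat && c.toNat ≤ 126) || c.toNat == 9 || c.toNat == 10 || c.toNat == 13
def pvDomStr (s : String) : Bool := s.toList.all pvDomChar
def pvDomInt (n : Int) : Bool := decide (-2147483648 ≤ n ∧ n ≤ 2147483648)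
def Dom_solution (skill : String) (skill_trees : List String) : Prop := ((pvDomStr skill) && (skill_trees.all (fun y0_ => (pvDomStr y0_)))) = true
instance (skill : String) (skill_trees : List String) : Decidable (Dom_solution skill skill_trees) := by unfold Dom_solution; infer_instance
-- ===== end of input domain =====

-- B validates each tree in one scan with an index into skill and early exit,
-- instead of building the filtered string and comparing it with a prefix slice of skill.

-- ===== PORT A =====
-- inner loop: order = ""; for s in v: if s in skill: order += s
def solOrder (skill : List Char) (v : List Char) : List Char :=
  v.foldl (fun order s => if skill.contains s then order ++ [s] else order) []

def solution (skill : String) (skill_trees : List String) : Int :=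
  skill_trees.foldl (fun answer v =>
    let order := solOrder skill.toList v.toList
    -- skill[:len(order)] == order
    if PySem.List.slice skill.toList none (some (order.length : Int)) = order then
      answer + 1
    else answer) 0

-- ===== PORT B =====
-- inner loop of Source B: pos index into skill, early exit on mismatch or overrun
def checkTree (skill : List Char) : List Char → Nat → Bool
  | [], _ => true
  | c :: rest, pos =>
    if skill.contains c then
      if pos ≥ skill.length then false
      else if skill[pos]? ≠ some c then false
      else checkTree skill rest (pos + 1)
    else checkTree skill rest pos

def solution_alt (skill : String) (skill_trees : List String) : Int :=
  skill_trees.foldl (fun count tree =>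
    if checkTree skill.toList tree.toList 0 then count + 1 else count) 0

-- ===== PRECONDITION & SPEC =====
def Spec_solution (skill : String) (skill_trees : List String) (out : Int) : Prop := out = solution_alt skill skill_trees
instance (skill : String) (skill_trees : List String) (out : Int) : Decidable (Spec_solution skill skill_trees out) := by unfold Spec_solution; infer_instance

-- ===== CLAIM (what is proved, stated in full; the proofs are below) =====
def Claim_equal_solution : Prop := ∀ (skill : String) (skill_trees : List String), Dom_solution skill skill_trees → Spec_solution skill skill_trees (solution skill skill_trees)

-- ===== LEMMAS AND PROOFS =====

theorem solOrder_aux (skill : List Char) (v : List Char) (acc : List Char) :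
    v.foldl (fun order s => if skill.contains s then order ++ [s] else order) acc
      = acc ++ v.filter (fun s => decide (s ∈ skill)) := by
  induction v generalizing acc with
  | nil => simp
  | cons c rest ih =>
    rw [List.foldl_cons, ih]
    by_cases h : c ∈ skill <;> simp [h]

theorem solOrder_eq_filter (skill : List Char) (v : List Char) :
    solOrder skill v = v.filter (fun s => decide (s ∈ skill)) := by
  have := solOrder_aux skill v []
  simpa [solOrder] using this

theorem checkTree_iff_prefix (skill : List Char) (v : List Char) (pos : Nat) :
    checkTree skill v pos = true ↔
      (v.filter (fun s => decide (s ∈ skill))) <+: skill.drop pos := by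
  induction v generalizing pos with
  | nil => simp [checkTree]
  | cons c rest ih =>
    by_cases hc : c ∈ skill
    · by_cases hp : pos ≥ skill.length
      · have hd : skill.drop pos = [] := List.drop_eq_nil_of_le hp
        simp [checkTree, hc, hp, hd]
      · rw [Nat.not_le] at hp
        have hd : skill.drop pos = skill[pos] :: skill.drop (pos + 1) :=
          List.drop_eq_getElem_cons hp
        have hg : skill[pos]? = some skill[pos] := List.getElem?_eq_getElem hp
        by_cases he : skill[pos] = c
        · rw [hd]
          simp [checkTree, hc, Nat.not_le.mpr hp, hg, he, ih, List.cons_prefix_cons]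
        · have hl : checkTree skill (c :: rest) pos = false := by
            simp [checkTree, hc, Nat.not_le.mpr hp, hg, he]
          rw [hl, hd]
          simp only [List.filter_cons, decide_eq_true_eq, hc, if_pos,
            List.cons_prefix_cons, Bool.false_eq_true, false_iff, not_and]
          intro h
          exact absurd h.symm he
    · simp [checkTree, hc, ih]

theorem take_eq_iff_prefix (skill f : List Char) :
    (PySem.List.slice skill none (some (f.length : Int)) = f) ↔ f <+: skill := by
  rw [PySem.List.slice_to_natCast]
  constructor
  · intro h
    exact h ▸ List.take_prefix f.length skill
  · intro h
    obtain ⟨t, rfl⟩ := h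
    simp

theorem per_tree (skill : List Char) (v : List Char) :
    (if PySem.List.slice skill none (some ((solOrder skill v).length : Int)) = solOrder skill v
       then true else false) = checkTree skill v 0 := by
  rw [solOrder_eq_filter]
  have hiff := checkTree_iff_prefix skill v 0
  simp only [List.drop_zero] at hiff
  by_cases h : checkTree skill v 0 = true
  · rw [if_pos ((take_eq_iff_prefix skill _).mpr (hiff.mp h)), h]
  · have hb : checkTree skill v 0 = false := by
      cases hx : checkTree skill v 0 <;> simp_all
    rw [if_neg (fun heq => h (hiff.mpr ((take_eq_iff_prefix skill _).mp heq))), hb]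

theorem fold_eq (skill : String) (trees : List String) (n : Int) :
    trees.foldl (fun answer v =>
      let order := solOrder skill.toList v.toList
      if PySem.List.slice skill.toList none (some (order.length : Int)) = order then
        answer + 1
      else answer) n
    = trees.foldl (fun count tree =>
        if checkTree skill.toList tree.toList 0 then count + 1 else count) n := by
  induction trees generalizing n with
  | nil => rfl
  | cons t rest ih =>
    simp only [List.foldl_cons]
    have := per_tree skill.toList t.toList
    by_cases h : checkTree skill.toList t.toList 0 = true
    · rw [h] at this
      split at this <;> simp_all
    · have hb : checkTree skill.toList t.toList 0 = false := by
        cases hx : checkTree skill.toList t.toList 0 <;> simp_all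
      rw [hb] at this
      split at this <;> simp_all

-- ===== VERDICT (by name: the statement is the Claim_ definition above) =====
theorem solution_spec : Claim_equal_solution := by
  intro skill trees _
  unfold Spec_solution solution solution_alt
  exact fold_eq skill trees 0
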